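-- pv_equiv track=rewrite | github.com/hhoppe/advent_of_code | 2024/advent_of_code_2024.py | day10d
-- ===== SOURCE A (Python) =====
-- def day10d(s, part2=False):
--   lines = s.splitlines()
--   chart = tuple(tuple(int(c) for c in line) for line in lines)
--   w, h = len(chart[0]), len(chart)
--
--   if not part2:
--     scores1 = [[set[tuple[int, int]]() for _ in line] for line in chart]
--     for n in range(9, -1, -1):
--       for ci in range(h):
--         for cj in range(w):
--           if chart[ci][cj] != n:
--             continue
--           if n == 9:
--             scores1[ci][cj].add((ci, cj))
--           else:
--             for di, dj in [(-1, 0), (1, 0), (0, -1), (0, 1)]: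
--               ni, nj = ci + di, cj + dj
--               if 0 <= ni < h and 0 <= nj < w and chart[ni][nj] == n + 1:
--                 scores1[ci][cj] |= scores1[ni][nj]
--     return sum(len(scores1[i][j]) for i in range(h) for j in range(w) if chart[i][j] == 0)
--
--   if 1:
--     scores2 = [[0 for _ in line] for line in chart]
--     for n in range(9, -1, -1):
--       for ci in range(h):
--         for cj in range(w):
--           if chart[ci][cj] != n:
--             continue
--           if n == 9:
--             scores2[ci][cj] = 1
--           else:
--             for di, dj in [(-1, 0), (1, 0), (0, -1), (0, 1)]:
--               ni, nj = ci + di, cj + dj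
--               if 0 <= ni < h and 0 <= nj < w and chart[ni][nj] == n + 1:
--                 scores2[ci][cj] += scores2[ni][nj]
--     return sum(scores2[i][j] for i in range(h) for j in range(w) if chart[i][j] == 0)
-- ===== SOURCE B (Python) =====
-- def day10d(s, part2=False):
--   lines = s.splitlines()
--   chart = tuple(tuple(int(c) for c in line) for line in lines)
--   w, h = len(chart[0]), len(chart)
--
--   def peaks(ci, cj):
--     # set of height-9 cells reachable by +1 steps from (ci, cj)
--     if chart[ci][cj] == 9:
--       return {(ci, cj)}
--     acc = set()
--     for di, dj in ((-1, 0), (1, 0), (0, -1), (0, 1)):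
--       ni, nj = ci + di, cj + dj
--       if 0 <= ni < h and 0 <= nj < w and chart[ni][nj] == chart[ci][cj] + 1:
--         acc |= peaks(ni, nj)
--     return acc
--
--   def trails(ci, cj):
--     # number of +1-step paths from (ci, cj) to a height-9 cell
--     if chart[ci][cj] == 9:
--       return 1
--     acc = 0
--     for di, dj in ((-1, 0), (1, 0), (0, -1), (0, 1)):
--       ni, nj = ci + di, cj + dj
--       if 0 <= ni < h and 0 <= nj < w and chart[ni][nj] == chart[ci][cj] + 1:
--         acc += trails(ni, nj)
--     return acc
--
--   f = trails if part2 else (lambda i, j: len(peaks(i, j)))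
--   return sum(f(i, j) for i in range(h) for j in range(w) if chart[i][j] == 0)
-- ===== Notes on version B (the rewrite author's own statement) =====
-- stated objective: alternative
-- what changed: Replaced A's nine-sweep reverse DP over height levels (repeatedly rescanning the whole grid per level) by direct recursive descent from each trailhead, following +1 neighbours and unioning peak sets (part 1) / adding path counts (part 2).
import Mathlib
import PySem

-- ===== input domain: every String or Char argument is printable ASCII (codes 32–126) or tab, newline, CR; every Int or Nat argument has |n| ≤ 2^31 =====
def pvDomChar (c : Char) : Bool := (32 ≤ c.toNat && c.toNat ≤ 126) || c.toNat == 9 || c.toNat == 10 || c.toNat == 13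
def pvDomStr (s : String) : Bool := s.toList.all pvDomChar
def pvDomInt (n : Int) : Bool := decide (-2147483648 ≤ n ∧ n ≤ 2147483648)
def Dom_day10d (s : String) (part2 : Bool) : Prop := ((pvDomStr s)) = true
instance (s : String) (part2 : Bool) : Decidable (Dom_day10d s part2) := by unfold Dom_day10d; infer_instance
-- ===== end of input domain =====

-- B replaces A's nine-sweep reverse DP over height levels by direct recursive descent
-- (follow +1 neighbours from each trailhead; union peak sets for part 1, add path counts
-- for part 2): an alternative decomposition of the same cost class, not claimed faster.

-- ===== PORT A =====
-- shared parse (both Pythons parse identically): chart = tuple(tuple(int(c) for c in line) ...)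
-- int(c) on a one-char string is PySem.Int.ofStr? (getD 0 is never reached under Pre_: digits only)
def pvParse (s : String) : List (List Int) :=
  (PySem.Str.splitlines s).map (fun line => line.toList.map (fun c => (PySem.Int.ofStr? (String.ofList [c])).getD 0))

-- chart[i][j]; used only with 0 ≤ i, j, and in range under the loop guards / Pre_
def pvGG (chart : List (List Int)) (i j : Int) : Int := (chart.getD i.toNat []).getD j.toNat 0

def pvDirs : List (Int × Int) := [(-1, 0), (1, 0), (0, -1), (0, 1)]

-- the value written into scores[ci][cj] at level n (the in-place add / |= accumulation)
def pvCell {σ : Type} (chart : List (List Int)) (h w : Nat) (nineA : Int × Int → σ → σ)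
    (join : σ → σ → σ) (n : Int) (S : Nat → Nat → σ) (ci cj : Nat) : σ :=
  if n = 9 then nineA ((ci : Int), (cj : Int)) (S ci cj)
  else pvDirs.foldl (fun acc d =>
    let ni : Int := (ci : Int) + d.1
    let nj : Int := (cj : Int) + d.2
    if 0 ≤ ni ∧ ni < (h : Int) ∧ 0 ≤ nj ∧ nj < (w : Int) ∧ pvGG chart ni nj = n + 1
    then join acc (S ni.toNat nj.toNat) else acc) (S ci cj)

-- one level n of A's DP: the two nested 'for ci / for cj' loops (the mutable 2D list is
-- modelled as a function grid updated pointwise — exact on the indices the code touches)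
def pvStep {σ : Type} (chart : List (List Int)) (h w : Nat) (nineA : Int × Int → σ → σ)
    (join : σ → σ → σ) (S : Nat → Nat → σ) (n : Int) : Nat → Nat → σ :=
  (List.range h).foldl (fun (S : Nat → Nat → σ) (ci : Nat) =>
    (List.range w).foldl (fun (S : Nat → Nat → σ) (cj : Nat) =>
      if pvGG chart (ci : Int) (cj : Int) ≠ n then S
      else fun i j => if i = ci ∧ j = cj then pvCell chart h w nineA join n S ci cj else S i j) S) S

-- 'for n in range(9, -1, -1)' over the score grid initialised to empty
def pvDP {σ : Type} (chart : List (List Int)) (h w : Nat) (nineA : Int × Int → σ → σ)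
    (join : σ → σ → σ) (empty : σ) : Nat → Nat → σ :=
  (PySem.List.pyRange 9 (-1) (-1)).foldl (pvStep chart h w nineA join) (fun _ _ => empty)

-- sum(f(i, j) for i in range(h) for j in range(w) if chart[i][j] == 0)  (identical in both Pythons)
def pvSumGrid (chart : List (List Int)) (h w : Nat) (f : Nat → Nat → Int) : Int :=
  (List.range h).foldl (fun (a : Int) (i : Nat) =>
    (List.range w).foldl (fun (a : Int) (j : Nat) =>
      if pvGG chart (i : Int) (j : Int) = 0 then a + f i j else a) a) 0

def day10d (s : String) (part2 : Bool) : Int :=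
  let chart := pvParse s
  let w := (chart.headD []).length   -- len(chart[0]); Pre_ excludes the empty-chart IndexError
  let h := chart.length
  if part2 = false then
    let S := pvDP chart h w (fun p s => PySem.Set.add s p) PySem.Set.union
      (PySem.Set.empty (α := Int × Int))
    pvSumGrid chart h w (fun i j => PySem.Set.len (S i j))
  else
    let S := pvDP chart h w (fun _ _ => (1 : Int)) (· + ·) (0 : Int)
    pvSumGrid chart h w (fun i j => S i j)

-- ===== PORT B =====
-- recursive descent (Source B's peaks/trails); fuel only makes the recursion structural:
-- each call moves to a strictly greater height ≤ 9, so fuel 10 at a height-0 cell never runs out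
def pvRec {σ : Type} (chart : List (List Int)) (h w : Nat) (nineB : Int × Int → σ)
    (join : σ → σ → σ) (empty : σ) : Nat → Nat → Nat → σ
  | fuel, ci, cj =>
    if pvGG chart ci cj = 9 then nineB ((ci : Int), (cj : Int))
    else match fuel with
      | 0 => empty
      | f + 1 => pvDirs.foldl (fun acc d =>
          let ni : Int := (ci : Int) + d.1
          let nj : Int := (cj : Int) + d.2
          if 0 ≤ ni ∧ ni < (h : Int) ∧ 0 ≤ nj ∧ nj < (w : Int) ∧
              pvGG chart ni nj = pvGG chart ci cj + 1
          then join acc (pvRec chart h w nineB join empty f ni.toNat nj.toNat) else acc) empty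

def day10d_alt (s : String) (part2 : Bool) : Int :=
  let chart := pvParse s
  let w := (chart.headD []).length
  let h := chart.length
  if part2 then
    pvSumGrid chart h w (fun i j => pvRec chart h w (fun _ => (1 : Int)) (· + ·) (0 : Int) 10 i j)
  else
    pvSumGrid chart h w (fun i j =>
      PySem.Set.len (pvRec chart h w (fun p => PySem.Set.ofList [p]) PySem.Set.union
        (PySem.Set.empty (α := Int × Int)) 10 i j))

-- ===== PRECONDITION & SPEC =====
-- Pre_ = exactly the inputs where A returns: at least one line (else len(chart[0]) raises
-- IndexError), every character a digit (else int(c) raises ValueError), and every line at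
-- least as long as the first (else chart[ci][cj] raises IndexError for some cj < w).
def Pre_day10d (s : String) (part2 : Bool) : Prop :=
  PySem.Str.splitlines s ≠ [] ∧
  ∀ line ∈ PySem.Str.splitlines s,
    (PySem.Str.strIsdigit line = true ∨ line = "") ∧
    ((PySem.Str.splitlines s).headD "").toList.length ≤ line.toList.length

instance (s : String) (part2 : Bool) : Decidable (Pre_day10d s part2) := by
  unfold Pre_day10d; infer_instance

def pvWitness_day10d : String × Bool := ("0123\n9874\n0165", false)

def Spec_day10d (s : String) (part2 : Bool) (out : Int) : Prop := out = day10d_alt s part2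
instance (s : String) (part2 : Bool) (out : Int) : Decidable (Spec_day10d s part2 out) := by
  unfold Spec_day10d; infer_instance

-- ===== CLAIM (what is proved, stated in full; the proofs are below) =====
def Claim_equal_day10d : Prop := ∀ (s : String) (part2 : Bool), Dom_day10d s part2 →
  Pre_day10d s part2 → Spec_day10d s part2 (day10d s part2)

-- ===== LEMMAS AND PROOFS =====

theorem pv_range90 : PySem.List.pyRange 9 (-1) (-1) = [9, 8, 7, 6, 5, 4, 3, 2, 1, 0] := by decide

theorem pv_isdigit_mem (c : Char) (h : PySem.Chars.isdigit c = true) :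
    c ∈ ['0','1','2','3','4','5','6','7','8','9'] := by
  unfold PySem.Chars.isdigit at h
  simp only [Bool.and_eq_true, decide_eq_true_eq, Char.le_def, UInt32.le_iff_toNat_le] at h
  simp only [List.mem_cons, List.not_mem_nil, or_false, Char.ext_iff, ← UInt32.toNat_inj]
  simp only [show ('0' : Char).val.toNat = 48 from rfl, show ('1' : Char).val.toNat = 49 from rfl,
    show ('2' : Char).val.toNat = 50 from rfl, show ('3' : Char).val.toNat = 51 from rfl,
    show ('4' : Char).val.toNat = 52 from rfl, show ('5' : Char).val.toNat = 53 from rfl,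
    show ('6' : Char).val.toNat = 54 from rfl, show ('7' : Char).val.toNat = 55 from rfl,
    show ('8' : Char).val.toNat = 56 from rfl, show ('9' : Char).val.toNat = 57 from rfl] at h ⊢
  omega

theorem pv_digit_bounds : ∀ c ∈ ['0','1','2','3','4','5','6','7','8','9'],
    0 ≤ (PySem.Int.ofStr? (String.ofList [c])).getD 0 ∧ (PySem.Int.ofStr? (String.ofList [c])).getD 0 ≤ 9 := by
  intro c hc
  fin_cases hc <;> exact by decide

-- nested range-foldl = foldl over the row-major cell list
theorem pv_foldl_grid {σ : Type} (g : σ → Nat → Nat → σ) (hh ww : Nat) (S : σ) :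
    (List.range hh).foldl (fun S ci => (List.range ww).foldl (fun S cj => g S ci cj) S) S =
    ((List.range hh).flatMap (fun i => (List.range ww).map (fun j => (i, j)))).foldl
      (fun S c => g S c.1 c.2) S := by
  induction (List.range hh) generalizing S with
  | nil => rfl
  | cons a l ih =>
    simp only [List.foldl_cons, List.flatMap_cons, List.foldl_append, List.foldl_map, ih]

theorem pv_cells_nodup (hh ww : Nat) :
    ((List.range hh).flatMap (fun i => (List.range ww).map (fun j => (i, j)))).Nodup := by
  refine List.nodup_flatMap.2 ⟨fun i _ => ?_, ?_⟩
  · exact (List.nodup_range).map (fun a b hab => congrArg Prod.snd hab)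
  · refine (List.nodup_range).imp (fun {a b} hab => ?_)
    intro p hp hq
    simp only [List.mem_map] at hp hq
    obtain ⟨x, _, rfl⟩ := hp
    obtain ⟨y, _, hy⟩ := hq
    exact hab (by cases hy; rfl)

theorem pv_mem_cells {hh ww : Nat} {i j : Nat} :
    (i, j) ∈ (List.range hh).flatMap (fun i => (List.range ww).map (fun j => (i, j))) ↔
      i < hh ∧ j < ww := by
  constructor
  · intro hp
    simp only [List.mem_flatMap, List.mem_map, List.mem_range] at hp
    obtain ⟨a, ha, b, hb, he⟩ := hp
    cases he; exact ⟨ha, hb⟩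
  · rintro ⟨hi, hj⟩
    simp only [List.mem_flatMap, List.mem_map, List.mem_range]
    exact ⟨i, hi, ⟨j, hj, rfl⟩⟩

-- B's value with exactly the fuel its height prescribes
def pvR {σ : Type} (chart : List (List Int)) (h w : Nat) (nineB : Int × Int → σ)
    (join : σ → σ → σ) (empty : σ) (i j : Nat) : σ :=
  pvRec chart h w nineB join empty (10 - (pvGG chart (i : Int) (j : Int)).toNat) i j

-- the uncurried per-cell step of one of A's levels
def pvCStep {σ : Type} (chart : List (List Int)) (h w : Nat) (nineA : Int × Int → σ → σ)
    (join : σ → σ → σ) (n : Int) (S : Nat → Nat → σ) (c : Nat × Nat) : Nat → Nat → σ :=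
  if pvGG chart (c.1 : Int) (c.2 : Int) ≠ n then S
  else fun i j => if i = c.1 ∧ j = c.2 then pvCell chart h w nineA join n S c.1 c.2 else S i j

def pvCells (hh ww : Nat) : List (Nat × Nat) :=
  (List.range hh).flatMap (fun i => (List.range ww).map (fun j => (i, j)))

-- the mid-level invariant while processing level n with remaining cell list `cells`
def pvMid {σ : Type} (chart : List (List Int)) (h w : Nat) (nineB : Int × Int → σ)
    (join : σ → σ → σ) (empty : σ) (n : Int) (S : Nat → Nat → σ) (cells : List (Nat × Nat)) : Prop :=
  ∀ i j, i < h → j < w →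
    (n < pvGG chart (i : Int) (j : Int) → S i j = pvR chart h w nineB join empty i j) ∧
    (pvGG chart (i : Int) (j : Int) < n → S i j = empty) ∧
    (pvGG chart (i : Int) (j : Int) = n →
      ((i, j) ∈ cells → S i j = empty) ∧
      ((i, j) ∉ cells → S i j = pvR chart h w nineB join empty i j))

def pvInv {σ : Type} (chart : List (List Int)) (h w : Nat) (nineB : Int × Int → σ)
    (join : σ → σ → σ) (empty : σ) (n : Int) (S : Nat → Nat → σ) : Prop :=
  ∀ i j, i < h → j < w →
    (n ≤ pvGG chart (i : Int) (j : Int) → S i j = pvR chart h w nineB join empty i j) ∧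
    (pvGG chart (i : Int) (j : Int) < n → S i j = empty)

theorem pvRec_at_nine {σ : Type} (chart : List (List Int)) (h w : Nat) (nineB : Int × Int → σ)
    (join : σ → σ → σ) (empty : σ) (fuel ci cj : Nat)
    (hgg : pvGG chart (ci : Int) (cj : Int) = 9) :
    pvRec chart h w nineB join empty fuel ci cj = nineB ((ci : Int), (cj : Int)) := by
  rw [pvRec.eq_def]
  simp [hgg]

theorem pvRec_at_succ {σ : Type} (chart : List (List Int)) (h w : Nat) (nineB : Int × Int → σ)
    (join : σ → σ → σ) (empty : σ) (f ci cj : Nat)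
    (hgg : pvGG chart (ci : Int) (cj : Int) ≠ 9) :
    pvRec chart h w nineB join empty (f + 1) ci cj =
      pvDirs.foldl (fun acc d =>
        let ni : Int := (ci : Int) + d.1
        let nj : Int := (cj : Int) + d.2
        if 0 ≤ ni ∧ ni < (h : Int) ∧ 0 ≤ nj ∧ nj < (w : Int) ∧
            pvGG chart ni nj = pvGG chart (ci : Int) (cj : Int) + 1
        then join acc (pvRec chart h w nineB join empty f ni.toNat nj.toNat) else acc) empty := by
  rw [pvRec.eq_def]
  simp [hgg]

-- the value A writes at a level-n cell equals B's recursive value there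
theorem pv_cell_eq {σ : Type} (chart : List (List Int)) (h w : Nat)
    (nineA : Int × Int → σ → σ) (nineB : Int × Int → σ) (join : σ → σ → σ) (empty : σ)
    (Hnine : ∀ p, nineA p empty = nineB p)
    (n : Int) (hn0 : 0 ≤ n) (hn9 : n ≤ 9) (S : Nat → Nat → σ) (ci cj : Nat)
    (hgg : pvGG chart (ci : Int) (cj : Int) = n)
    (Hnb : ∀ i j, i < h → j < w → pvGG chart (i : Int) (j : Int) = n + 1 →
      S i j = pvR chart h w nineB join empty i j)
    (Hself : S ci cj = empty) :
    pvCell chart h w nineA join n S ci cj = pvR chart h w nineB join empty ci cj := by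
  by_cases h9 : n = 9
  · subst h9
    rw [pvCell, if_pos rfl, Hself, Hnine]
    rw [pvR, pvRec_at_nine chart h w nineB join empty _ _ _ hgg]
  · have hfuel : 10 - n.toNat = (9 - n.toNat) + 1 := by omega
    rw [pvR, hgg, hfuel,
      pvRec_at_succ chart h w nineB join empty _ _ _ (by rw [hgg]; exact h9)]
    rw [pvCell, if_neg h9, Hself, hgg]
    apply PySem.List.foldl_congr_mem
    intro acc d hd
    simp only
    by_cases hc : 0 ≤ (ci : Int) + d.1 ∧ (ci : Int) + d.1 < (h : Int) ∧
        0 ≤ (cj : Int) + d.2 ∧ (cj : Int) + d.2 < (w : Int) ∧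
        pvGG chart ((ci : Int) + d.1) ((cj : Int) + d.2) = n + 1
    · rw [if_pos hc, if_pos hc]
      obtain ⟨h1, h2, h3, h4, h5⟩ := hc
      have e1 : ((((ci : Int) + d.1).toNat : Nat) : Int) = (ci : Int) + d.1 :=
        Int.toNat_of_nonneg h1
      have e2 : ((((cj : Int) + d.2).toNat : Nat) : Int) = (cj : Int) + d.2 :=
        Int.toNat_of_nonneg h3
      have hlt1 : ((ci : Int) + d.1).toNat < h := by omega
      have hlt2 : ((cj : Int) + d.2).toNat < w := by omega
      have hv : pvGG chart ((((ci : Int) + d.1).toNat : Nat) : Int)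
          ((((cj : Int) + d.2).toNat : Nat) : Int) = n + 1 := by rw [e1, e2]; exact h5
      rw [Hnb _ _ hlt1 hlt2 hv, pvR, hv]
      have : (10 : Nat) - (n + 1).toNat = 9 - n.toNat := by omega
      rw [this]
    · rw [if_neg hc, if_neg hc]

-- processing a nodup list of in-range cells completes level n
theorem pv_fold_cells {σ : Type} (chart : List (List Int)) (h w : Nat)
    (nineA : Int × Int → σ → σ) (nineB : Int × Int → σ) (join : σ → σ → σ) (empty : σ)
    (Hnine : ∀ p, nineA p empty = nineB p) (n : Int) (hn0 : 0 ≤ n) (hn9 : n ≤ 9) :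
    ∀ (cells : List (Nat × Nat)) (S : Nat → Nat → σ), cells.Nodup →
      (∀ c ∈ cells, c.1 < h ∧ c.2 < w) →
      pvMid chart h w nineB join empty n S cells →
      pvMid chart h w nineB join empty n
        (cells.foldl (pvCStep chart h w nineA join n) S) [] := by
  intro cells
  induction cells with
  | nil => intro S _ _ hmid; exact hmid
  | cons c cs ih =>
    intro S hnd hrange hmid
    obtain ⟨a, b⟩ := c
    have hab : a < h ∧ b < w := hrange (a, b) (List.mem_cons_self ..)
    have hnotin : (a, b) ∉ cs := (List.nodup_cons.1 hnd).1
    rw [List.foldl_cons]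
    refine ih _ ((List.nodup_cons.1 hnd).2) (fun c hc => hrange c (List.mem_cons_of_mem _ hc)) ?_
    by_cases hcc : pvGG chart (a : Int) (b : Int) = n
    · have hstep : pvCStep chart h w nineA join n S (a, b) =
          fun i j => if i = a ∧ j = b then pvCell chart h w nineA join n S a b else S i j := by
        rw [pvCStep, if_neg (by simpa using hcc)]
      rw [hstep]
      have hcell : pvCell chart h w nineA join n S a b =
          pvR chart h w nineB join empty a b := by
        apply pv_cell_eq chart h w nineA nineB join empty Hnine n hn0 hn9 S a b hcc
        · intro i j hi hj hv
          exact ((hmid i j hi hj).1 (by omega))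
        · exact ((hmid a b hab.1 hab.2).2.2 hcc).1 (List.mem_cons_self ..)
      intro i j hi hj
      by_cases hij : i = a ∧ j = b
      · obtain ⟨rfl, rfl⟩ := hij
        refine ⟨fun hgt => absurd hcc (by omega), fun hlt => absurd hcc (by omega), fun _ => ?_⟩
        constructor
        · intro hmem; exact absurd hmem hnotin
        · intro _; simpa using hcell
      · have hSij : (fun i j => if i = a ∧ j = b then
            pvCell chart h w nineA join n S a b else S i j) i j = S i j := by
          simp only [if_neg hij]
        rw [hSij]
        obtain ⟨m1, m2, m3⟩ := hmid i j hi hj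
        refine ⟨m1, m2, fun heq => ?_⟩
        constructor
        · intro hmem; exact (m3 heq).1 (List.mem_cons_of_mem _ hmem)
        · intro hmem
          exact (m3 heq).2 (by
            intro hmem'
            rcases List.mem_cons.1 hmem' with he | hm
            · exact hij (by cases he; exact ⟨rfl, rfl⟩)
            · exact hmem hm)
    · have hstep : pvCStep chart h w nineA join n S (a, b) = S := by
        rw [pvCStep, if_pos (by simpa using hcc)]
      rw [hstep]
      intro i j hi hj
      obtain ⟨m1, m2, m3⟩ := hmid i j hi hj
      refine ⟨m1, m2, fun heq => ?_⟩
      constructor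
      · intro hmem; exact (m3 heq).1 (List.mem_cons_of_mem _ hmem)
      · intro hmem
        exact (m3 heq).2 (by
          intro hmem'
          rcases List.mem_cons.1 hmem' with he | hm
          · exact hcc (by cases he; exact heq)
          · exact hmem hm)

-- one full level of A's DP preserves the invariant, lowering n by one
theorem pv_step_inv {σ : Type} (chart : List (List Int)) (h w : Nat)
    (nineA : Int × Int → σ → σ) (nineB : Int × Int → σ) (join : σ → σ → σ) (empty : σ)
    (Hnine : ∀ p, nineA p empty = nineB p) (n : Int) (hn0 : 0 ≤ n) (hn9 : n ≤ 9)
    (S : Nat → Nat → σ) (hinv : pvInv chart h w nineB join empty (n + 1) S) :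
    pvInv chart h w nineB join empty n (pvStep chart h w nineA join S n) := by
  have hgrid : pvStep chart h w nineA join S n =
      (pvCells h w).foldl (pvCStep chart h w nineA join n) S := by
    rw [pvStep, pvCells]
    exact pv_foldl_grid (fun S ci cj => pvCStep chart h w nineA join n S (ci, cj)) h w S
  rw [hgrid]
  have hmid0 : pvMid chart h w nineB join empty n S (pvCells h w) := by
    intro i j hi hj
    obtain ⟨i1, i2⟩ := hinv i j hi hj
    refine ⟨fun hgt => i1 (by omega), fun hlt => i2 (by omega), fun heq => ?_⟩
    constructor
    · intro _; exact i2 (by omega)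
    · intro hmem; exact absurd (pv_mem_cells.2 ⟨hi, hj⟩) hmem
  have hfinal := pv_fold_cells chart h w nineA nineB join empty Hnine n hn0 hn9
    (pvCells h w) S (pv_cells_nodup h w) (fun c hc => pv_mem_cells.1 (by
      obtain ⟨a, b⟩ := c; exact hc)) hmid0
  intro i j hi hj
  obtain ⟨m1, m2, m3⟩ := hfinal i j hi hj
  constructor
  · intro hle
    rcases lt_or_eq_of_le hle with hlt | heq
    · exact m1 hlt
    · exact (m3 heq.symm).2 (List.not_mem_nil)
  · exact m2

-- A's finished DP grid equals B's recursion on every in-range cell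
theorem pv_main {σ : Type} (chart : List (List Int)) (h w : Nat)
    (nineA : Int × Int → σ → σ) (nineB : Int × Int → σ) (join : σ → σ → σ) (empty : σ)
    (Hnine : ∀ p, nineA p empty = nineB p)
    (HB : ∀ i j, i < h → j < w →
      0 ≤ pvGG chart (i : Int) (j : Int) ∧ pvGG chart (i : Int) (j : Int) ≤ 9) :
    ∀ i j, i < h → j < w →
      pvDP chart h w nineA join empty i j = pvR chart h w nineB join empty i j := by
  have h10 : pvInv chart h w nineB join empty 10 (fun _ _ => empty) := by
    intro i j hi hj
    exact ⟨fun hge => absurd (HB i j hi hj).2 (by omega), fun _ => rfl⟩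
  have step := fun (n : Int) hn0 hn9 S hinv =>
    pv_step_inv chart h w nineA nineB join empty Hnine n hn0 hn9 S hinv
  rw [pvDP, pv_range90]
  simp only [List.foldl_cons, List.foldl_nil]
  have h9 := step 9 (by omega) (by omega) _ h10
  have h8 := step 8 (by omega) (by omega) _ h9
  have h7 := step 7 (by omega) (by omega) _ h8
  have h6 := step 6 (by omega) (by omega) _ h7
  have h5 := step 5 (by omega) (by omega) _ h6
  have h4 := step 4 (by omega) (by omega) _ h5
  have h3 := step 3 (by omega) (by omega) _ h4
  have h2 := step 2 (by omega) (by omega) _ h3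
  have h1 := step 1 (by omega) (by omega) _ h2
  have h0 := step 0 (by omega) (by omega) _ h1
  intro i j hi hj
  exact (h0 i j hi hj).1 (HB i j hi hj).1

-- the final sum only reads height-0 cells in range
theorem pv_sum_congr (chart : List (List Int)) (h w : Nat) (f g : Nat → Nat → Int)
    (hfg : ∀ i j, i < h → j < w → pvGG chart (i : Int) (j : Int) = 0 → f i j = g i j) :
    pvSumGrid chart h w f = pvSumGrid chart h w g := by
  rw [pvSumGrid, pvSumGrid]
  apply PySem.List.foldl_congr_mem
  intro acc i hi
  apply PySem.List.foldl_congr_mem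
  intro acc' j hj
  by_cases hz : pvGG chart (i : Int) (j : Int) = 0
  · rw [if_pos hz, if_pos hz,
      hfg i j (List.mem_range.1 hi) (List.mem_range.1 hj) hz]
  · rw [if_neg hz, if_neg hz]

-- under Pre_ every in-range chart value is a digit value
theorem pv_pre_bounds (s : String) (part2 : Bool) (hpre : Pre_day10d s part2) :
    ∀ i j, i < (pvParse s).length → j < ((pvParse s).headD []).length →
      0 ≤ pvGG (pvParse s) (i : Int) (j : Int) ∧ pvGG (pvParse s) (i : Int) (j : Int) ≤ 9 := by
  obtain ⟨hne, hall⟩ := hpre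
  intro i j hi hj
  have hlen : (pvParse s).length = (PySem.Str.splitlines s).length := by
    rw [pvParse, List.length_map]
  have hi' : i < (PySem.Str.splitlines s).length := hlen ▸ hi
  have hrow : (pvParse s).getD i [] =
      ((PySem.Str.splitlines s)[i]).toList.map
        (fun c => (PySem.Int.ofStr? (String.ofList [c])).getD 0) := by
    rw [pvParse, List.getD_eq_getElem?_getD, List.getElem?_map,
      List.getElem?_eq_getElem hi']
    simp
  have hline := hall ((PySem.Str.splitlines s)[i]) (List.getElem_mem hi')
  have hhead : ((pvParse s).headD []).length =
      ((PySem.Str.splitlines s).headD "").toList.length := by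
    rcases hsp : PySem.Str.splitlines s with _ | ⟨l0, ls⟩
    · exact absurd hsp hne
    · rw [pvParse, hsp]; simp
  have hj' : j < ((PySem.Str.splitlines s)[i]).toList.length := by
    have h2 := hline.2
    omega
  have hcell : pvGG (pvParse s) (i : Int) (j : Int) =
      (PySem.Int.ofStr? (String.ofList [((PySem.Str.splitlines s)[i]).toList[j]])).getD 0 := by
    rw [pvGG, Int.toNat_natCast, Int.toNat_natCast, hrow,
      List.getD_eq_getElem?_getD, List.getElem?_map, List.getElem?_eq_getElem hj']
    simp
  rw [hcell]
  have hdig : PySem.Str.strIsdigit ((PySem.Str.splitlines s)[i]) = true := by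
    rcases hline.1 with hd | hempty
    · exact hd
    · rw [hempty] at hj'; simp at hj'
  rw [PySem.Str.strIsdigit_eq] at hdig
  unfold PySem.Chars.strIsdigit at hdig
  simp only [Bool.and_eq_true, List.all_eq_true] at hdig
  exact pv_digit_bounds _ (pv_isdigit_mem _ (hdig.2 _ (List.getElem_mem hj')))

-- ===== VERDICT (by name: the statement is the Claim_ definition above) =====
theorem day10d_spec : Claim_equal_day10d := by
  intro s part2 _ hpre
  unfold Spec_day10d
  have HB := pv_pre_bounds s part2 hpre
  cases part2 with
  | false =>
    simp only [day10d, day10d_alt, reduceIte]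
    apply pv_sum_congr
    intro i j hi hj hz
    have hm := pv_main (pvParse s) (pvParse s).length ((pvParse s).headD []).length
      (fun p s => PySem.Set.add s p) (fun p => PySem.Set.ofList [p])
      PySem.Set.union PySem.Set.empty (fun p => rfl) HB i j hi hj
    rw [hm, pvR, hz]
    norm_num
  | true =>
    simp only [day10d, day10d_alt, reduceIte]
    apply pv_sum_congr
    intro i j hi hj hz
    have hm := pv_main (pvParse s) (pvParse s).length ((pvParse s).headD []).length
      (fun _ _ => (1 : Int)) (fun _ => (1 : Int))
      (· + ·) (0 : Int) (fun p => rfl) HB i j hi hj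
    rw [hm, pvR, hz]
    norm_num
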